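-- pv_equiv track=rewrite | github.com/MrDolphin-gud/SEC-DED-Simulator | hamming.py | kod_olustur
-- ===== SOURCE A (Python) =====
-- def hesapla_r(m):
--     r = 0
--     while (2 ** r) < (m + r + 1):
--         r += 1
--     return r
--
-- def kod_olustur(veri):
--     m = len(veri)
--     r = hesapla_r(m)
--     toplam_uzunluk = m + r
--     kod = ['_' for _ in range(toplam_uzunluk)]
--     # Veriyi sağdan sola yerleştirme (LSB of data goes to first available data slot)
--     veri_rev = veri[::-1]
--     j = 0
--     for i in range(toplam_uzunluk):
--         # Parity bit positions (1, 2, 4, 8, ...) are powers of 2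
--         # (i+1) is the 1-based position. If (i+1) is a power of 2, it's a parity bit.
--         if (i + 1) & i == 0:  # Checks if (i+1) is a power of 2
--             continue
--         # If not a parity bit position, place data bit
--         if j < m:  # Ensure we don't run out of data bits
--             kod[i] = veri_rev[j]
--             j += 1
--         else:  # Should not happen if r is calculated correctly
--             kod[i] = '0'  # Placeholder if m is smaller than available data slots
--
--     # Eski check değerini hesapla (sadece veri bitlerinin 1 olduğu pozisyonların XOR'u)
--     # Pozisyonlar 1-tabanlı ve LSB'den başlar (kod[0] = pos 1, kod[1] = pos 2, ...)
--     eski_check = 0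
--     adimlar = []
--     for i, bit_char in enumerate(kod):  # Iterate through the partly filled 'kod'
--         pos = i + 1
--         if (pos & (pos - 1)) == 0:  # Skip parity bit positions (power of 2 check)
--             continue
--         if bit_char == '1':  # Only consider data bits that are '1'
--             eski_check ^= pos
--             ikili = format(pos, '0{}b'.format(r))  # Format position to r bits
--             adimlar.append(f"{ikili} (pozisyon {pos})")
--
--     # Parite bitlerini yerleştir
--     # The k-th bit of eski_check (0-indexed) becomes the parity bit p_{2^k}
--     for k_parity_index in range(r):  # k_parity_index = 0 for p1, 1 for p2, 2 for p4
--         parity_bit_pos_1_based = (2 ** k_parity_index)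
--         idx_in_kod_array = parity_bit_pos_1_based - 1
--
--         # Extract the k_parity_index-th bit from eski_check
--         bit_degeri_for_parity = (eski_check >> k_parity_index) & 1
--         kod[idx_in_kod_array] = str(bit_degeri_for_parity)
--
--     kod_str = ''.join(kod[::-1])  # Reverse for MSB-first display
--     eski_check_ikili = format(eski_check, '0{}b'.format(r))
--     return kod, kod_str, r, eski_check, eski_check_ikili, adimlar
-- ===== SOURCE B (Python) =====
-- def kod_olustur(veri):
--     m = len(veri)
--     r = 0
--     while (1 << r) < m + r + 1:
--         r += 1
--     rev = veri[::-1]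
--     # Block-wise construction: block k covers 1-based positions 2^k .. 2^(k+1)-1
--     # (truncated at the end): one parity slot followed by its run of data bits.
--     blocks = []
--     start = 0
--     for k in range(r):
--         size = min((1 << k) - 1, m - start)
--         blocks.append(rev[start:start + size])
--         start += size
--     eski_check = 0
--     adimlar = []
--     for k, chunk in enumerate(blocks):
--         base = 1 << k
--         off = 1
--         for bit in chunk:
--             if bit == '1':
--                 pos = base + off
--                 eski_check ^= pos
--                 adimlar.append("{:0{}b} (pozisyon {})".format(pos, r, pos))
--             off += 1
--     kod = []
--     for k, chunk in enumerate(blocks):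
--         kod.append(str((eski_check >> k) & 1))
--         kod.extend(chunk)
--     kod_str = ''.join(reversed(kod))
--     return kod, kod_str, r, eski_check, "{:0{}b}".format(eski_check, r), adimlar
-- ===== Notes on version B (the rewrite author's own statement) =====
-- stated objective: alternative
-- what changed: A builds the codeword by scanning every position three times with a power-of-two test at each index (place data with a running counter into a '_'-placeholder array, rescan enumerate(kod) for the check/steps, then patch the parity cells); B never tests positions at all: it slices the reversed data into r blocks (block k = the data run between parity positions 2^k and 2^(k+1)), computes the check and steps in one nested pass over the blocks with positions derived as base+offset, and emits the codeword as the concatenation of [parity_k] + block_k.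
import Mathlib
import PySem

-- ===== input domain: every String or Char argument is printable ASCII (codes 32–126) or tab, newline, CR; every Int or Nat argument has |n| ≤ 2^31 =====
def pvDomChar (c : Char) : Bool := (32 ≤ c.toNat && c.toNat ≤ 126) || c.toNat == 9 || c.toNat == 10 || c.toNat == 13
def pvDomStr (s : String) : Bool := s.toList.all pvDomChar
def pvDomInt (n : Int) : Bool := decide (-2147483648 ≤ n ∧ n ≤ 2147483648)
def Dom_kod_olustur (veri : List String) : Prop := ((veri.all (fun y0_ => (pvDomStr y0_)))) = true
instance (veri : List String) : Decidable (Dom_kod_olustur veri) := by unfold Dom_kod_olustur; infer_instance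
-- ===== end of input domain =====

-- B replaces A's per-position scans (power-of-two test at every index, running data
-- counter, rescan for the check, parity patch-up) by a block-wise construction:
-- the codeword is built as r blocks [parity k, data run of 2^k-1 bits] obtained by
-- slicing the reversed data (objective: alternative decomposition, same cost).

-- ===== shared helpers (transliterations of code both Pythons contain verbatim) =====

-- termination helper for the 'while (2 ** r) < (m + r + 1)' loop
theorem pvTwoMulLePow : ∀ r : Nat, 1 ≤ r → 2 * r ≤ 2 ^ r := by
  intro r hr
  induction r with
  | zero => omega
  | succ k ih =>
    rcases Nat.eq_zero_or_pos k with h0 | h1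
    · subst h0; norm_num
    · have h2 : 2 ≤ 2 ^ k := Nat.one_lt_two_pow_iff.mpr (by omega)
      have h3 := ih h1
      have hp : 2 ^ (k + 1) = 2 ^ k * 2 := pow_succ 2 k
      omega

-- hesapla_r / B's identical 'while (1 << r) < m + r + 1' loop
def hesaplaGo (m r : Nat) : Nat :=
  if 2 ^ r < m + r + 1 then hesaplaGo m (r + 1) else r
termination_by m + 1 - r
decreasing_by
  have hr : r ≤ m := by
    rcases Nat.eq_zero_or_pos r with h0 | h1
    · omega
    · have := pvTwoMulLePow r h1; omega
  omega

-- binary digits of a positive number (msb first), used by format(x, '0{}b')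
def pvBinChars (x : Nat) : List Char :=
  if h : x = 0 then [] else pvBinChars (x / 2) ++ [if x % 2 == 1 then '1' else '0']
termination_by x
decreasing_by exact Nat.div_lt_self (Nat.pos_of_ne_zero h) (by omega)

-- format(x, '0{}b'.format(w)) ; exact for x ≥ 0 (the only values it receives here)
def pvFmtBin (x : Int) (w : Nat) : String :=
  let ds := if x.toNat = 0 then ['0'] else pvBinChars x.toNat
  String.mk (List.replicate (w - ds.length) '0' ++ ds)

-- f"{ikili} (pozisyon {pos})" with ikili = format(pos, '0{}b'.format(r))
def pvAdim (pos : Int) (r : Nat) : String :=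
  pvFmtBin pos r ++ " (pozisyon " ++ PySem.Int.toStr pos ++ ")"

-- ===== PORT A =====
-- literal transliteration of A: placeholder array '_', first scan placing data bits with a
-- running j counter, second scan over enumerate(kod) accumulating the check/steps, third
-- loop writing the parity bits by list mutation.  veri[::-1] is List.reverse
-- (PySem.List.slice?_none_none_neg_one).
def kod_olustur (veri : List String) : List String × String × Int × Int × String × List String :=
  let m := veri.length
  let r := hesaplaGo m 0
  let n := m + r
  let veriRev := veri.reverse
  let st1 := (List.range n).foldl (fun (st : List String × Nat) i =>
      if (i + 1) &&& i == 0 then st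
      else if st.2 < m then (st.1.set i (veriRev.getD st.2 ""), st.2 + 1)
      else (st.1.set i "0", st.2 + 1)) (List.replicate n "_", 0)
  let st2 := (PySem.List.enumerate st1.1).foldl (fun (st : Int × List String) ib =>
      if PySem.Int.band (ib.1 + 1) ib.1 == 0 then st
      else if ib.2 == "1" then (PySem.Int.bxor st.1 (ib.1 + 1), st.2 ++ [pvAdim (ib.1 + 1) r])
      else st) (0, [])
  let kod2 := (List.range r).foldl (fun kod k =>
      kod.set (2 ^ k - 1) (PySem.Int.toStr (PySem.Int.band (st2.1 >>> k) 1))) st1.1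
  (kod2, PySem.Str.join "" kod2.reverse, (r : Int), st2.1, pvFmtBin st2.1 r, st2.2)

-- ===== PORT B =====
-- literal transliteration of B: slice the reversed data into r blocks (block k = the run
-- of data bits of positions 2^k+1 .. 2^(k+1)-1), one nested pass over the blocks for the
-- check and the steps, then emit each block as parity bit followed by its data run.
-- veri[::-1] is List.reverse (PySem.List.slice?_none_none_neg_one); enumerate(blocks)
-- is List.zipIdx (index k ≥ 0, so the Nat index is exact).
def kod_olustur_alt (veri : List String) : List String × String × Int × Int × String × List String :=
  let m := veri.length
  let r := hesaplaGo m 0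
  let rev := veri.reverse
  let bs := (List.range r).foldl (fun (st : List (List String) × Nat) k =>
      let size := min (2 ^ k - 1) (m - st.2)
      (st.1 ++ [PySem.List.slice rev (some (st.2 : Int)) (some ((st.2 : Int) + (size : Int)))],
       st.2 + size)) ([], 0)
  let blocks := bs.1
  let st := blocks.zipIdx.foldl (fun (st : Int × List String) kc =>
      let inner := kc.1.foldl (fun (s : Int × List String × Nat) bit =>
          if bit == "1" then
            (PySem.Int.bxor s.1 ((2 ^ kc.2 + s.2.2 : Nat) : Int),
             s.2.1 ++ [pvAdim ((2 ^ kc.2 + s.2.2 : Nat) : Int) r], s.2.2 + 1)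
          else (s.1, s.2.1, s.2.2 + 1)) (st.1, st.2, 1)
      (inner.1, inner.2.1)) (0, [])
  let kod := blocks.zipIdx.foldl (fun (kod : List String) (kc : List String × Nat) =>
      kod ++ (PySem.Int.toStr (PySem.Int.band (st.1 >>> kc.2) 1) :: kc.1)) []
  (kod, PySem.Str.join "" kod.reverse, (r : Int), st.1, pvFmtBin st.1 r, st.2)

-- ===== PRECONDITION & SPEC =====
def Spec_kod_olustur (veri : List String) (out : List String × String × Int × Int × String × List String) : Prop := out = kod_olustur_alt veri
instance (veri : List String) (out : List String × String × Int × Int × String × List String) : Decidable (Spec_kod_olustur veri out) := by unfold Spec_kod_olustur; infer_instance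

-- ===== CLAIM (what is proved, stated in full; the proofs are below) =====
def Claim_equal_kod_olustur : Prop := ∀ (veri : List String), Dom_kod_olustur veri → Spec_kod_olustur veri (kod_olustur veri)

-- ===== LEMMAS AND PROOFS =====

theorem pvFst {α β : Type} (a : α) (b : β) : (a, b).1 = a := rfl
theorem pvSnd {α β : Type} (a : α) (b : β) : (a, b).2 = b := rfl

-- proof-side abbreviations
def pvQ (p : Nat) : Bool := p &&& (p - 1) != 0                    -- "p is not a power of two"
def pvBL (p : Nat) : Nat := PySem.Int.bitLength (p : Int)
def pvCnt (p : Nat) : Nat := (List.range' 1 (p - 1)).countP pvQ  -- data positions below p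
def pvF (V : List String) (m i : Nat) : String :=
  if (i + 1) &&& i == 0 then "_"
  else if pvCnt (i + 1) < m then V.getD (pvCnt (i + 1)) "" else "0"

theorem hesaplaGo_spec (m : Nat) : ∀ r0 : Nat,
    r0 ≤ hesaplaGo m r0 ∧ m + hesaplaGo m r0 + 1 ≤ 2 ^ hesaplaGo m r0 ∧
      ∀ r', r0 ≤ r' → r' < hesaplaGo m r0 → 2 ^ r' < m + r' + 1 := by
  intro r0
  induction r0 using hesaplaGo.induct (m := m) with
  | case1 r0 h ih =>
    have hgo : hesaplaGo m r0 = hesaplaGo m (r0 + 1) := by rw [hesaplaGo, if_pos h]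
    rw [hgo]
    obtain ⟨ih1, ih2, ih3⟩ := ih
    refine ⟨by omega, ih2, ?_⟩
    intro r' h1 h2
    rcases Nat.eq_or_lt_of_le h1 with h3 | h3
    · subst h3; exact h
    · exact ih3 r' h3 h2
  | case2 r0 h =>
    have hgo : hesaplaGo m r0 = r0 := by rw [hesaplaGo, if_neg h]
    rw [hgo]
    exact ⟨le_rfl, by omega, by omega⟩

-- bit-length facts (pvBL is Python's bit_length on naturals)
theorem pvBL_zero : pvBL 0 = 0 := by decide

theorem pvBL_lt (x : Nat) : x < 2 ^ pvBL x := by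
  have h := PySem.Int.lt_two_pow_bitLength (x : Int)
  simpa [pvBL] using h

theorem pvBL_le (x : Nat) (hx : x ≠ 0) : 2 ^ (pvBL x - 1) ≤ x := by
  have h := PySem.Int.two_pow_bitLength_le (x : Int) (by exact_mod_cast hx)
  simpa [pvBL] using h

theorem pvBL_pos (x : Nat) (hx : 0 < x) : 1 ≤ pvBL x := by
  by_contra h
  have h0 : pvBL x = 0 := by omega
  have h1 := pvBL_lt x
  rw [h0] at h1
  simp at h1
  omega

theorem pvBL_eq_of (x b : Nat) (hb : 0 < b) (h1 : 2 ^ (b - 1) ≤ x) (h2 : x < 2 ^ b) :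
    pvBL x = b := by
  have hx : 0 < x := lt_of_lt_of_le (Nat.pow_pos (by omega)) h1
  have hlt := pvBL_lt x
  have hle := pvBL_le x (by omega)
  by_contra hne
  rcases Nat.lt_or_ge (pvBL x) b with hc | hc
  · have : 2 ^ pvBL x ≤ 2 ^ (b - 1) := Nat.pow_le_pow_right (by omega) (by omega)
    omega
  · have hc' : b < pvBL x := by omega
    have : 2 ^ b ≤ 2 ^ (pvBL x - 1) := Nat.pow_le_pow_right (by omega) (by omega)
    omega

theorem pvBL_le_of_lt (x b : Nat) (h : x < 2 ^ b) : pvBL x ≤ b := by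
  rcases Nat.eq_zero_or_pos x with h0 | h0
  · subst h0; simp [pvBL_zero]
  · by_contra hc
    have hle := pvBL_le x (by omega)
    have : 2 ^ b ≤ 2 ^ (pvBL x - 1) := Nat.pow_le_pow_right (by omega) (by omega)
    omega

theorem pvBL_pow (k : Nat) : pvBL (2 ^ k) = k + 1 :=
  pvBL_eq_of _ _ (by omega) (by simp)
    (by have := Nat.pow_lt_pow_succ (a := 2) (n := k) (by omega); simpa using this)

theorem pvBL_two_mul (q : Nat) (hq : 0 < q) : pvBL (2 * q) = pvBL q + 1 := by
  have h : PySem.Int.bitLength ((2 * q : Nat) : Int)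
      = PySem.Int.bitLength ((2 * q / 2 : Nat) : Int) + 1 := PySem.Int.bitLength_natCast (by omega)
  have h2 : (2 * q) / 2 = q := by omega
  rw [h2] at h
  simpa [pvBL] using h

theorem pvBL_two_mul_add_one (q : Nat) : pvBL (2 * q + 1) = pvBL q + 1 := by
  have h : PySem.Int.bitLength ((2 * q + 1 : Nat) : Int)
      = PySem.Int.bitLength (((2 * q + 1) / 2 : Nat) : Int) + 1 := PySem.Int.bitLength_natCast (by omega)
  have h2 : (2 * q + 1) / 2 = q := by omega
  rw [h2] at h
  simpa [pvBL] using h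

-- bit computations for the power-of-two test
theorem pvBand_even (q : Nat) (hq : 0 < q) : (2 * q) &&& (2 * q - 1) = 2 * (q &&& (q - 1)) := by
  apply Nat.eq_of_testBit_eq
  intro i
  cases i with
  | zero =>
    rw [Nat.testBit_and]
    simp only [Nat.testBit_zero]
    have e1 : (2 * q) % 2 = 0 := by omega
    have e2 : (2 * (q &&& (q - 1))) % 2 = 0 := by omega
    rw [e1, e2]
    simp
  | succ j =>
    rw [Nat.testBit_and]
    simp only [Nat.testBit_succ]
    have e1 : (2 * q) / 2 = q := by omega
    have e2 : (2 * q - 1) / 2 = q - 1 := by omega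
    have e3 : (2 * (q &&& (q - 1))) / 2 = q &&& (q - 1) := by omega
    rw [e1, e2, e3, ← Nat.testBit_and]

theorem pvBand_odd (q : Nat) : (2 * q + 1) &&& (2 * q) = 2 * q := by
  apply Nat.eq_of_testBit_eq
  intro i
  cases i with
  | zero =>
    rw [Nat.testBit_and]
    simp only [Nat.testBit_zero]
    have e1 : (2 * q + 1) % 2 = 1 := by omega
    have e2 : (2 * q) % 2 = 0 := by omega
    rw [e1, e2]
    simp
  | succ j =>
    rw [Nat.testBit_and]
    simp only [Nat.testBit_succ]
    have e1 : (2 * q + 1) / 2 = q := by omega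
    have e2 : (2 * q) / 2 = q := by omega
    rw [e1, e2, Bool.and_self]

-- the power-of-two test: p & (p-1) == 0  ↔  p = 2^(p.bit_length()-1)
theorem pvPow2_iff : ∀ p : Nat, 0 < p → (((p &&& (p - 1)) == 0) = true ↔ p = 2 ^ (pvBL p - 1)) := by
  intro p
  induction p using Nat.strong_induction_on with
  | _ p ih =>
    intro hp
    rcases Nat.even_or_odd p with ⟨q, hq⟩ | ⟨q, hq⟩
    · have hq1 : 0 < q := by omega
      have hpe : p = 2 * q := by omega
      subst hpe
      have ihq := ih q (by omega) hq1
      have hbl : pvBL (2 * q) = pvBL q + 1 := pvBL_two_mul q hq1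
      rw [pvBand_even q hq1, hbl]
      have hblp : 1 ≤ pvBL q := pvBL_pos q hq1
      have hpow : 2 ^ pvBL q = 2 * 2 ^ (pvBL q - 1) := by
        have h := pow_succ 2 (pvBL q - 1)
        have e : pvBL q - 1 + 1 = pvBL q := by omega
        rw [e] at h
        omega
      have e2 : pvBL q + 1 - 1 = pvBL q := by omega
      rw [e2]
      constructor
      · intro h
        have h2 : q &&& (q - 1) = 0 := by
          have h3 : 2 * (q &&& (q - 1)) = 0 := by simpa using h
          omega
        have h4 := ihq.mp (by simp [h2])
        omega
      · intro h
        have hq3 : q = 2 ^ (pvBL q - 1) := by omega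
        have h4 := ihq.mpr hq3
        have h5 : q &&& (q - 1) = 0 := by simpa using h4
        simp [h5]
    · have hpe : p = 2 * q + 1 := by omega
      subst hpe
      rcases Nat.eq_zero_or_pos q with h0 | h1
      · subst h0; decide
      · have hbl : pvBL (2 * q + 1) = pvBL q + 1 := pvBL_two_mul_add_one q
        have e : 2 * q + 1 - 1 = 2 * q := by omega
        rw [e, pvBand_odd q, hbl]
        have hblp : 1 ≤ pvBL q := pvBL_pos q h1
        have hpow : 2 ^ (pvBL q + 1 - 1) = 2 * 2 ^ (pvBL q - 1) := by
          have e2 : pvBL q + 1 - 1 = (pvBL q - 1) + 1 := by omega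
          rw [e2, pow_succ]
          omega
        constructor
        · intro h
          have h2 : 2 * q = 0 := by simpa using h
          omega
        · intro h
          rw [hpow] at h
          exact absurd h (by omega)

-- bit-length step: bl(k+1) = bl(k) + [k+1 is a power of two]
theorem pvBL_succ (k : Nat) :
    pvBL (k + 1) = pvBL k + (if ((k + 1) &&& k == 0) = true then 1 else 0) := by
  rcases Nat.eq_zero_or_pos k with h0 | h1
  · subst h0; decide
  · have hb := pvBL_pos k h1
    have hb1 := pvBL_le k (by omega)
    have hb2 := pvBL_lt k
    by_cases h : k + 1 = 2 ^ pvBL k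
    · have hble : pvBL (k + 1) = pvBL k + 1 := by
        apply pvBL_eq_of _ _ (by omega)
        · have e : pvBL k + 1 - 1 = pvBL k := by omega
          rw [e]
          omega
        · have hp2 : 2 ^ (pvBL k + 1) = 2 ^ pvBL k * 2 := pow_succ 2 (pvBL k)
          omega
      have htest : (((k + 1) &&& k) == 0) = true := by
        have h2 := (pvPow2_iff (k + 1) (by omega)).mpr (by
          rw [hble]
          have e : pvBL k + 1 - 1 = pvBL k := by omega
          rw [e]
          exact h)
        simpa using h2
      rw [hble, if_pos htest]
    · have hlt : k + 1 < 2 ^ pvBL k := by omega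
      have hble : pvBL (k + 1) = pvBL k :=
        pvBL_eq_of _ _ (by omega) (by omega) hlt
      have htest : ¬ (((k + 1) &&& k) == 0) = true := by
        intro hc
        have h2 := (pvPow2_iff (k + 1) (by omega)).mp (by simpa using hc)
        rw [hble] at h2
        omega
      rw [hble, if_neg htest]
      omega

theorem pvRange'Concat (k : Nat) : List.range' 1 (k + 1) = List.range' 1 k ++ [k + 1] := by
  have h := List.range'_append (s := 1) (m := k) (n := 1) (step := 1)
  simp only [List.range'_one, one_mul] at h
  rw [← h]
  congr 1
  have e : 1 + k = k + 1 := by omega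
  rw [e]

-- counting powers of two in [1..k]
theorem pvCountP2 (k : Nat) :
    (List.range' 1 k).countP (fun p => p &&& (p - 1) == 0) = pvBL k := by
  induction k with
  | zero => simp [pvBL_zero]
  | succ k ih =>
    rw [pvRange'Concat k, List.countP_append, ih, pvBL_succ k]
    simp only [List.countP_cons, List.countP_nil, Nat.add_sub_cancel]
    omega

-- countP of data positions
theorem pvCountQ (k : Nat) : (List.range' 1 k).countP pvQ = k - pvBL k := by
  have h := List.length_eq_countP_add_countP (p := fun p => p &&& (p - 1) == 0) (l := List.range' 1 k)
  have h2 : (List.range' 1 k).countP (fun a => decide ¬((fun p => p &&& (p - 1) == 0) a = true)) =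
      (List.range' 1 k).countP pvQ := by
    apply List.countP_congr
    intro x _
    simp [pvQ]
  rw [h2] at h
  have h3 : (List.range' 1 k).length = k := by simp
  rw [pvCountP2 k] at h
  omega

theorem pvCnt_succ (k : Nat) :
    pvCnt (k + 1 + 1) = pvCnt (k + 1) + (if pvQ (k + 1) = true then 1 else 0) := by
  show (List.range' 1 (k + 1)).countP pvQ = (List.range' 1 k).countP pvQ + _
  rw [pvRange'Concat k, List.countP_append]
  simp [List.countP_cons]

-- generic: set on a map-over-range
theorem pvSetMapRange {α : Type} (g : Nat → α) (n k : Nat) (v : α) (hk : k < n) :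
    ((List.range n).map g).set k v = (List.range n).map (fun i => if i = k then v else g i) := by
  apply List.ext_getElem
  · simp
  · intro i h1 h2
    rw [List.getElem_set]
    simp only [List.getElem_map, List.getElem_range]
    by_cases h3 : k = i
    · subst h3
      rw [if_pos rfl]
    · rw [if_neg h3, if_neg (by omega : ¬ i = k)]

-- characterization of A's first loop (data placement with running j counter)
theorem pvLoop1 (V : List String) (m n : Nat) :
    ∀ k, k ≤ n →
      (List.range k).foldl (fun (st : List String × Nat) i =>
          if (i + 1) &&& i == 0 then st
          else if st.2 < m then (st.1.set i (V.getD st.2 ""), st.2 + 1)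
          else (st.1.set i "0", st.2 + 1)) (List.replicate n "_", 0)
      = ((List.range n).map (fun i => if i < k then pvF V m i else "_"), pvCnt (k + 1)) := by
  intro k
  induction k with
  | zero =>
    intro _
    have h1 : pvCnt 1 = 0 := by simp [pvCnt]
    rw [h1]
    have h2 : (List.range n).map (fun i => if i < 0 then pvF V m i else "_")
        = List.replicate n "_" := by
      apply List.ext_getElem <;> simp
    rw [h2]
    simp
  | succ k ih =>
    intro hk
    rw [List.range_succ, List.foldl_append, ih (by omega)]
    simp only [List.foldl_cons, List.foldl_nil]
    by_cases h : (((k + 1) &&& k) == 0) = true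
    · rw [if_pos h]
      have hx : (k + 1) &&& k = 0 := by simpa using h
      have hq : pvQ (k + 1) = false := by simp [pvQ, hx]
      have h2 : pvCnt (k + 1 + 1) = pvCnt (k + 1) := by rw [pvCnt_succ]; simp [hq]
      rw [h2]
      have hm : (List.range n).map (fun i => if i < k then pvF V m i else "_")
          = (List.range n).map (fun i => if i < k + 1 then pvF V m i else "_") := by
        apply List.map_congr_left
        intro i hi
        simp only [List.mem_range] at hi
        by_cases h3 : i < k
        · rw [if_pos h3, if_pos (by omega : i < k + 1)]
        · by_cases h4 : i < k + 1
          · have h5 : i = k := by omega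
            subst h5
            rw [if_neg h3, if_pos h4]
            simp only [pvF]
            rw [if_pos h]
          · rw [if_neg h3, if_neg h4]
      rw [hm]
    · rw [if_neg h]
      have hx : (k + 1) &&& k ≠ 0 := by simpa using h
      have hq : pvQ (k + 1) = true := by simp [pvQ, hx]
      have h2 : pvCnt (k + 1 + 1) = pvCnt (k + 1) + 1 := by rw [pvCnt_succ]; simp [hq]
      have hmap : ∀ v : String,
          v = (if ((k + 1) &&& k == 0) = true then "_"
               else if pvCnt (k + 1) < m then V.getD (pvCnt (k + 1)) "" else "0") →
          ((List.range n).map (fun i => if i < k then pvF V m i else "_")).set k v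
            = (List.range n).map (fun i => if i < k + 1 then pvF V m i else "_") := by
        intro v hv
        rw [pvSetMapRange _ n k v (by omega)]
        apply List.map_congr_left
        intro i hi
        simp only [List.mem_range] at hi
        by_cases h5 : i = k
        · subst h5
          rw [if_pos rfl, if_pos (by omega : i < i + 1), hv]
          rfl
        · by_cases h3 : i < k
          · rw [if_neg h5, if_pos h3, if_pos (by omega : i < k + 1)]
          · rw [if_neg h5, if_neg h3, if_neg (by omega : ¬ i < k + 1)]
      by_cases hj : pvCnt (k + 1) < m
      · rw [if_pos hj, h2, hmap _ (by rw [if_neg h, if_pos hj])]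
      · rw [if_neg hj, h2, hmap _ (by rw [if_neg h, if_neg hj])]

-- characterization of A's third loop (parity placement)
theorem pvLoop3 (g : Nat → String) (parity : Nat → String) (n r : Nat)
    (hlt : ∀ K, K < r → 2 ^ K - 1 < n) :
    ∀ K, K ≤ r →
      (List.range K).foldl (fun kod k => kod.set (2 ^ k - 1) (parity k)) ((List.range n).map g)
      = (List.range n).map (fun i =>
          if (((i + 1) &&& i == 0) && decide (pvBL (i + 1) - 1 < K)) = true then parity (pvBL (i + 1) - 1)
          else g i) := by
  intro K
  induction K with
  | zero =>
    intro _
    have h2 : ∀ i ∈ List.range n,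
        (if (((i + 1) &&& i == 0) && decide (pvBL (i + 1) - 1 < 0)) = true
         then parity (pvBL (i + 1) - 1) else g i) = g i := by
      intro i _
      rw [if_neg]
      simp
    rw [List.range_zero, List.foldl_nil]
    exact (List.map_congr_left h2).symm
  | succ K ih =>
    intro hK
    rw [List.range_succ, List.foldl_append, ih (by omega)]
    simp only [List.foldl_cons, List.foldl_nil]
    rw [pvSetMapRange _ n (2 ^ K - 1) (parity K) (hlt K (by omega))]
    apply List.map_congr_left
    intro i hi
    simp only [List.mem_range] at hi
    have hpow : 1 ≤ 2 ^ K := Nat.one_le_two_pow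
    by_cases hip : i = 2 ^ K - 1
    · subst hip
      rw [if_pos rfl]
      have hi1 : 2 ^ K - 1 + 1 = 2 ^ K := by omega
      have hbl : pvBL (2 ^ K - 1 + 1) = K + 1 := by rw [hi1]; exact pvBL_pow K
      have hP2 : ((2 ^ K - 1 + 1) &&& (2 ^ K - 1) == 0) = true := by
        have h2 := (pvPow2_iff (2 ^ K - 1 + 1) (by omega)).mpr (by
          rw [hbl, hi1]
          try congr 1
          try omega)
        simpa using h2
      have hdec : (((2 ^ K - 1 + 1) &&& (2 ^ K - 1) == 0)
          && decide (pvBL (2 ^ K - 1 + 1) - 1 < K + 1)) = true := by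
        rw [hP2, hbl]
        simp
      rw [if_pos hdec, hbl]
      try congr 1
      try omega
    · rw [if_neg (by omega : ¬ i = 2 ^ K - 1)]
      by_cases h2 : (((i + 1) &&& i) == 0) = true
      · have hi2 : i + 1 = 2 ^ (pvBL (i + 1) - 1) := by
          have h3 := (pvPow2_iff (i + 1) (by omega)).mp (by simpa using h2)
          simpa using h3
        have hne : pvBL (i + 1) - 1 ≠ K := by
          intro hc
          rw [hc] at hi2
          omega
        have hdd : decide (pvBL (i + 1) - 1 < K + 1) = decide (pvBL (i + 1) - 1 < K) :=
          decide_eq_decide.mpr (by omega)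
        rw [hdd]
      · have hb : (((i + 1) &&& i) == 0) = false := by simpa using h2
        rw [hb, Bool.false_and, Bool.false_and]

-- a pair-state fold splits into the check fold and the steps map
theorem pvPairFold (r : Nat) : ∀ (L : List Int) (c0 : Int) (out0 : List String),
    L.foldl (fun (st : Int × List String) x => (PySem.Int.bxor st.1 x, st.2 ++ [pvAdim x r])) (c0, out0)
    = (L.foldl (fun c x => PySem.Int.bxor c x) c0, out0 ++ L.map (fun x => pvAdim x r)) := by
  intro L
  induction L with
  | nil => intro c0 out0; simp
  | cons x t ih =>
    intro c0 out0
    simp only [List.foldl_cons, List.map_cons, ih]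
    simp

-- A's second loop as a filter-map fold
theorem pvFoldStep2 (r : Nat) : ∀ (l : List (Int × String)) (st0 : Int × List String),
    l.foldl (fun (st : Int × List String) ib =>
      if PySem.Int.band (ib.1 + 1) ib.1 == 0 then st
      else if ib.2 == "1" then (PySem.Int.bxor st.1 (ib.1 + 1), st.2 ++ [pvAdim (ib.1 + 1) r])
      else st) st0
    = ((l.filter (fun ib => !(PySem.Int.band (ib.1 + 1) ib.1 == 0) && (ib.2 == "1"))).map
        (fun ib => ib.1 + 1)).foldl
        (fun (st : Int × List String) x => (PySem.Int.bxor st.1 x, st.2 ++ [pvAdim x r])) st0 := by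
  intro l
  induction l with
  | nil => intro st0; rfl
  | cons ib t ih =>
    intro st0
    simp only [List.foldl_cons, List.filter_cons]
    by_cases hb : (PySem.Int.band (ib.1 + 1) ib.1 == 0) = true
    · rw [if_pos hb, if_neg (by simp [hb])]
      exact ih st0
    · have hb' : (PySem.Int.band (ib.1 + 1) ib.1 == 0) = false := by simpa using hb
      rw [if_neg hb]
      by_cases hbit : (ib.2 == "1") = true
      · rw [if_pos hbit, if_pos (by simp [hb', hbit])]
        simp only [List.map_cons, List.foldl_cons]
        exact ih _
      · have hbit' : (ib.2 == "1") = false := by simpa using hbit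
        rw [if_neg hbit, if_neg (by simp [hb', hbit'])]
        exact ih st0

-- canonical common form of both programs
def pvL (veri : List String) (n : Nat) : List Int :=
  (((List.range n).filter (fun i =>
      pvQ (i + 1) && (veri.reverse.getD (pvCnt (i + 1)) "" == "1"))).map (fun i => i + 1)).map
    (fun i : Nat => (i : Int))

def pvCheck (veri : List String) (n : Nat) : Int :=
  (pvL veri n).foldl (fun c x => PySem.Int.bxor c x) 0

def pvKodF (veri : List String) (n r : Nat) : List String :=
  (List.range n).map (fun i =>
    if ((i + 1) &&& i == 0) = true then
      PySem.Int.toStr (PySem.Int.band (pvCheck veri n >>> (pvBL (i + 1) - 1)) 1)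
    else veri.reverse.getD (pvCnt (i + 1)) "")

def pvOut (veri : List String) : List String × String × Int × Int × String × List String :=
  let r := hesaplaGo veri.length 0
  let n := veri.length + r
  (pvKodF veri n r, PySem.Str.join "" (pvKodF veri n r).reverse, (r : Int), pvCheck veri n,
    pvFmtBin (pvCheck veri n) r, (pvL veri n).map (fun x => pvAdim x r))

-- shared numeric facts about m, r = hesapla_r(m), n = m + r
theorem pvFacts (m : Nat) :
    m + hesaplaGo m 0 + 1 ≤ 2 ^ hesaplaGo m 0 ∧
    (0 < hesaplaGo m 0 → 2 ^ (hesaplaGo m 0 - 1) < m + hesaplaGo m 0) ∧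
    pvBL (m + hesaplaGo m 0) = hesaplaGo m 0 ∧
    (List.range' 1 (m + hesaplaGo m 0)).countP pvQ = m := by
  obtain ⟨-, h1, h2⟩ := hesaplaGo_spec m 0
  have hmin : 0 < hesaplaGo m 0 → 2 ^ (hesaplaGo m 0 - 1) < m + hesaplaGo m 0 := by
    intro hr
    have h3 := h2 (hesaplaGo m 0 - 1) (by omega) (by omega)
    omega
  have hbn : pvBL (m + hesaplaGo m 0) = hesaplaGo m 0 := by
    rcases Nat.eq_zero_or_pos (hesaplaGo m 0) with h0 | hr
    · rw [h0] at h1 ⊢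
      have hp0 : (2:Nat) ^ 0 = 1 := by norm_num
      have hm0 : m = 0 := by omega
      rw [hm0]
      simpa using pvBL_zero
    · exact pvBL_eq_of _ _ hr (by have := hmin hr; omega) (by omega)
  refine ⟨h1, hmin, hbn, ?_⟩
  rw [pvCountQ (m + hesaplaGo m 0), hbn]
  omega

theorem pvDead (m : Nat) :
    ∀ p, 0 < p → p ≤ m + hesaplaGo m 0 → pvQ p = true → pvCnt p < m := by
  obtain ⟨-, -, -, htot⟩ := pvFacts m
  intro p hp hpn hq
  have hsplit : List.range' 1 p ++ List.range' (1 + p) (m + hesaplaGo m 0 - p) =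
      List.range' 1 (m + hesaplaGo m 0) := by
    have h := List.range'_append (s := 1) (m := p) (n := m + hesaplaGo m 0 - p) (step := 1)
    simp only [one_mul] at h
    rw [h]
    congr 1
    omega
  have hsub : (List.range' 1 p).Sublist (List.range' 1 (m + hesaplaGo m 0)) := by
    rw [← hsplit]
    exact List.sublist_append_left _ _
  have hle := hsub.countP_le (p := pvQ)
  have hconc : List.range' 1 p = List.range' 1 (p - 1) ++ [p] := by
    have h := pvRange'Concat (p - 1)
    have e : p - 1 + 1 = p := by omega
    rw [e] at h
    exact h
  have hcount : (List.range' 1 p).countP pvQ = pvCnt p + 1 := by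
    rw [hconc, List.countP_append]
    simp [pvCnt, hq]
  omega

-- the position/step list of A's second loop is the canonical one
theorem pvLA (veri : List String) :
    ((PySem.List.enumerate
        ((List.range (veri.length + hesaplaGo veri.length 0)).map (pvF veri.reverse veri.length)) 0).filter
        (fun ib => !(PySem.Int.band (ib.1 + 1) ib.1 == 0) && (ib.2 == "1"))).map (fun ib => ib.1 + 1)
      = pvL veri (veri.length + hesaplaGo veri.length 0) := by
  have hdead := pvDead veri.length
  set n := veri.length + hesaplaGo veri.length 0 with hn
  have hEnum : PySem.List.enumerate ((List.range n).map (pvF veri.reverse veri.length)) 0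
      = (List.range n).map (fun j : Nat => ((j : Int), pvF veri.reverse veri.length j)) := by
    rw [PySem.List.enumerate_eq_map_pyRange _ ""]
    simp only [PySem.List.len_eq, List.length_map, List.length_range]
    rw [PySem.List.pyRange_one 0 (n : Int)]
    simp only [Int.sub_zero, Int.toNat_natCast, List.map_map]
    apply List.map_congr_left
    intro j hj
    simp only [List.mem_range] at hj
    simp only [Function.comp_apply, zero_add]
    congr 1
    rw [PySem.List.pyGetD_natCast]
    rw [List.getD_eq_getElem _ "" (by simpa using hj)]
    simp [hj]
  rw [hEnum, List.filter_map, List.map_map]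
  have hfc : ∀ j ∈ List.range n,
      ((fun ib : Int × String => !(PySem.Int.band (ib.1 + 1) ib.1 == 0) && (ib.2 == "1")) ∘
        (fun j : Nat => ((j : Int), pvF veri.reverse veri.length j))) j
      = (fun i => pvQ (i + 1) && (veri.reverse.getD (pvCnt (i + 1)) "" == "1")) j := by
    intro j hj
    simp only [List.mem_range] at hj
    simp only [Function.comp_apply]
    have hcast : ((j : Int) + 1) = ((j + 1 : Nat) : Int) := by push_cast; ring
    have hband : (PySem.Int.band ((j : Int) + 1) (j : Int) == 0) = !(pvQ (j + 1)) := by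
      rw [hcast, PySem.Int.band_natCast]
      by_cases hz : (j + 1) &&& j = 0
      · simp [pvQ, hz]
      · have hzi : (((j + 1) &&& j : Nat) : Int) ≠ 0 := by exact_mod_cast hz
        have hL : ((((j + 1) &&& j : Nat) : Int) == 0) = false := beq_eq_false_iff_ne.mpr hzi
        have hR : (((j + 1) &&& j) != 0) = true := bne_iff_ne.mpr hz
        simp [pvQ, hL, hR]
    rw [hband, Bool.not_not]
    by_cases hqj : pvQ (j + 1) = true
    · have hjj : pvCnt (j + 1) < veri.length := hdead (j + 1) (by omega) (by omega) hqj
      have hf : pvF veri.reverse veri.length j = veri.reverse.getD (pvCnt (j + 1)) "" := by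
        simp only [pvF]
        rw [if_neg (by simp only [pvQ, Nat.add_sub_cancel, bne_iff_ne, ne_eq] at hqj; simp [hqj]),
            if_pos hjj]
      rw [hf]
    · have hq' : pvQ (j + 1) = false := by simpa using hqj
      rw [hq', Bool.false_and, Bool.false_and]
  rw [List.filter_congr hfc]
  unfold pvL
  rw [List.map_map]
  apply List.map_congr_left
  intro j hj
  simp only [Function.comp_apply]
  push_cast
  ring

-- ===== side A: port A equals the canonical form =====
theorem pvSideA (veri : List String) : kod_olustur veri = pvOut veri := by
  obtain ⟨hF1, hmin, hbn, htot⟩ := pvFacts veri.length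
  have hdead := pvDead veri.length
  simp only [kod_olustur, pvOut]
  rw [pvLoop1 veri.reverse veri.length (veri.length + hesaplaGo veri.length 0)
      (veri.length + hesaplaGo veri.length 0) le_rfl]
  simp only [pvFst, pvSnd]
  have hK : (List.range (veri.length + hesaplaGo veri.length 0)).map
        (fun i => if i < veri.length + hesaplaGo veri.length 0 then pvF veri.reverse veri.length i else "_")
      = (List.range (veri.length + hesaplaGo veri.length 0)).map (pvF veri.reverse veri.length) := by
    apply List.map_congr_left
    intro i hi
    simp only [List.mem_range] at hi
    rw [if_pos hi]
  rw [hK, pvFoldStep2, pvPairFold, pvLA veri]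
  simp only [pvFst, pvSnd, List.nil_append]
  have hchk : (pvL veri (veri.length + hesaplaGo veri.length 0)).foldl
      (fun c x => PySem.Int.bxor c x) 0 = pvCheck veri (veri.length + hesaplaGo veri.length 0) := rfl
  rw [hchk]
  have hlt3 : ∀ K, K < hesaplaGo veri.length 0 → 2 ^ K - 1 < veri.length + hesaplaGo veri.length 0 := by
    intro K hKr
    have h1 : 2 ^ K ≤ 2 ^ (hesaplaGo veri.length 0 - 1) := Nat.pow_le_pow_right (by omega) (by omega)
    have h2 := hmin (by omega)
    have h3 : 1 ≤ 2 ^ K := Nat.one_le_two_pow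
    omega
  rw [pvLoop3 (pvF veri.reverse veri.length)
      (fun k => PySem.Int.toStr (PySem.Int.band
        (pvCheck veri (veri.length + hesaplaGo veri.length 0) >>> k) 1))
      (veri.length + hesaplaGo veri.length 0) (hesaplaGo veri.length 0) hlt3
      (hesaplaGo veri.length 0) le_rfl]
  have hkodA : (List.range (veri.length + hesaplaGo veri.length 0)).map (fun i =>
        if (((i + 1) &&& i == 0) && decide (pvBL (i + 1) - 1 < hesaplaGo veri.length 0)) = true then
          PySem.Int.toStr (PySem.Int.band
            (pvCheck veri (veri.length + hesaplaGo veri.length 0) >>> (pvBL (i + 1) - 1)) 1)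
        else pvF veri.reverse veri.length i)
      = pvKodF veri (veri.length + hesaplaGo veri.length 0) (hesaplaGo veri.length 0) := by
    unfold pvKodF
    apply List.map_congr_left
    intro i hi
    simp only [List.mem_range] at hi
    by_cases h2 : (((i + 1) &&& i) == 0) = true
    · have hr1 : 0 < hesaplaGo veri.length 0 := by
        by_contra hc
        have h0 : hesaplaGo veri.length 0 = 0 := by omega
        rw [h0] at hF1
        have hp0 : (2:Nat) ^ 0 = 1 := by norm_num
        omega
      have hble : pvBL (i + 1) ≤ hesaplaGo veri.length 0 :=
        pvBL_le_of_lt (i + 1) _ (by omega)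
      have hblp : 1 ≤ pvBL (i + 1) := pvBL_pos _ (by omega)
      have hdec : (((i + 1) &&& i == 0)
          && decide (pvBL (i + 1) - 1 < hesaplaGo veri.length 0)) = true := by
        rw [h2]
        simp
        omega
      rw [if_pos hdec, if_pos h2]
    · have hb : (((i + 1) &&& i) == 0) = false := by simpa using h2
      rw [hb, Bool.false_and, if_neg (by simp), if_neg (by simp)]
      have hq : pvQ (i + 1) = true := by
        simp only [beq_iff_eq] at hb
        simp only [pvQ, Nat.add_sub_cancel, bne_iff_ne, ne_eq]
        simpa using hb
      have hjj : pvCnt (i + 1) < veri.length := hdead (i + 1) (by omega) (by omega) hq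
      simp only [pvF]
      rw [if_neg (by simp [hb]), if_pos hjj]
  rw [hkodA]

-- ===== side B: block decomposition lemmas =====

-- cumulative number of data bits placed before block K
def pvS (m K : Nat) : Nat := min (2 ^ K - 1 - K) m

-- the data run of block K (a slice of the reversed data)
def pvChunk (rev : List String) (m K : Nat) : List String :=
  (rev.drop (pvS m K)).take (pvS m (K + 1) - pvS m K)

theorem pvS_succ (m K : Nat) : pvS m (K + 1) = pvS m K + min (2 ^ K - 1) (m - pvS m K) := by
  have h1 : K < 2 ^ K := Nat.lt_two_pow_self
  have h2 : 2 ^ (K + 1) = 2 * 2 ^ K := by rw [pow_succ]; ring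
  unfold pvS
  omega

-- B's first loop: the slices are exactly the pvChunk table
theorem pvBlocksLoop (rev : List String) (m : Nat) : ∀ K,
    (List.range K).foldl (fun (st : List (List String) × Nat) k =>
        (st.1 ++ [PySem.List.slice rev (some (st.2 : Int))
            (some ((st.2 : Int) + ((min (2 ^ k - 1) (m - st.2) : Nat) : Int)))],
         st.2 + min (2 ^ k - 1) (m - st.2))) ([], 0)
    = ((List.range K).map (pvChunk rev m), pvS m K) := by
  intro K
  induction K with
  | zero => simp [pvS]
  | succ K ih =>
    rw [List.range_succ, List.foldl_append, ih]
    simp only [List.foldl_cons, List.foldl_nil, pvFst, pvSnd]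
    rw [PySem.List.slice_natCast_add]
    have hsz : min (2 ^ K - 1) (m - pvS m K) = pvS m (K + 1) - pvS m K := by
      have := pvS_succ m K
      omega
    have hS1 : pvS m K + (pvS m (K + 1) - pvS m K) = pvS m (K + 1) := by
      have := pvS_succ m K
      omega
    rw [hsz, hS1, List.map_append]
    rfl

-- the positions of the '1' bits of one block (base = 2^k, offsets from s)
def pvPosL (base s : Nat) (chunk : List String) : List Int :=
  ((chunk.zipIdx s).filter (fun p => p.1 == "1")).map (fun p => ((base + p.2 : Nat) : Int))

-- B's inner loop over one block
theorem pvInner (r base : Nat) : ∀ (chunk : List String) (c0 : Int) (out0 : List String) (off0 : Nat),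
    chunk.foldl (fun (s : Int × List String × Nat) bit =>
        if bit == "1" then
          (PySem.Int.bxor s.1 ((base + s.2.2 : Nat) : Int),
           s.2.1 ++ [pvAdim ((base + s.2.2 : Nat) : Int) r], s.2.2 + 1)
        else (s.1, s.2.1, s.2.2 + 1)) (c0, out0, off0)
    = ((pvPosL base off0 chunk).foldl (fun c x => PySem.Int.bxor c x) c0,
       out0 ++ (pvPosL base off0 chunk).map (fun x => pvAdim x r),
       off0 + chunk.length) := by
  intro chunk
  induction chunk with
  | nil => intro c0 out0 off0; simp [pvPosL]
  | cons x t ih =>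
    intro c0 out0 off0
    simp only [List.foldl_cons]
    have hposl : pvPosL base off0 (x :: t)
        = (if (x == "1") = true then [((base + off0 : Nat) : Int)] else []) ++ pvPosL base (off0 + 1) t := by
      unfold pvPosL
      rw [List.zipIdx_cons, List.filter_cons]
      by_cases hx : (x == "1") = true
      · rw [if_pos hx, if_pos hx]
        simp
      · rw [if_neg hx, if_neg hx]
        simp
    by_cases hx : (x == "1") = true
    · rw [if_pos hx, ih, hposl, if_pos hx]
      simp only [List.singleton_append, List.foldl_cons, List.map_cons]
      refine congrArg₂ _ rfl (congrArg₂ _ ?_ (by simp; omega))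
      simp
    · rw [if_neg hx, ih, hposl, if_neg hx]
      simp only [List.nil_append]
      refine congrArg₂ _ rfl (congrArg₂ _ rfl (by simp; omega))

-- B's outer check/steps loop over all blocks
theorem pvOuter (r : Nat) : ∀ (l : List (List String × Nat)) (c0 : Int) (out0 : List String),
    l.foldl (fun (st : Int × List String) kc =>
        ((kc.1.foldl (fun (s : Int × List String × Nat) bit =>
            if bit == "1" then
              (PySem.Int.bxor s.1 ((2 ^ kc.2 + s.2.2 : Nat) : Int),
               s.2.1 ++ [pvAdim ((2 ^ kc.2 + s.2.2 : Nat) : Int) r], s.2.2 + 1)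
            else (s.1, s.2.1, s.2.2 + 1)) (st.1, st.2, 1)).1,
         (kc.1.foldl (fun (s : Int × List String × Nat) bit =>
            if bit == "1" then
              (PySem.Int.bxor s.1 ((2 ^ kc.2 + s.2.2 : Nat) : Int),
               s.2.1 ++ [pvAdim ((2 ^ kc.2 + s.2.2 : Nat) : Int) r], s.2.2 + 1)
            else (s.1, s.2.1, s.2.2 + 1)) (st.1, st.2, 1)).2.1)) (c0, out0)
    = ((l.flatMap (fun kc => pvPosL (2 ^ kc.2) 1 kc.1)).foldl (fun c x => PySem.Int.bxor c x) c0,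
       out0 ++ (l.flatMap (fun kc => pvPosL (2 ^ kc.2) 1 kc.1)).map (fun x => pvAdim x r)) := by
  intro l
  induction l with
  | nil => intro c0 out0; simp
  | cons kc t ih =>
    intro c0 out0
    simp only [List.foldl_cons, pvInner r (2 ^ kc.2) kc.1 c0 out0 1, pvFst, pvSnd]
    rw [ih]
    simp only [List.flatMap_cons, List.foldl_append, List.map_append, List.append_assoc]

-- zipIdx over a map-of-range pairs each element with its own index
theorem pvZipIdxMap {α : Type} (f : Nat → α) (K : Nat) :
    ((List.range K).map f).zipIdx = (List.range K).map (fun k => (f k, k)) := by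
  apply List.ext_getElem
  · simp
  · intro i h1 h2
    simp [List.getElem_zipIdx]

-- splitting a range at a
theorem pvRangeSplit (a x : Nat) : List.range (a + x) = List.range a ++ List.range' a x := by
  rw [List.range_eq_range', List.range_eq_range']
  have h := List.range'_append (s := 0) (m := a) (n := x) (step := 1)
  simp only [one_mul, Nat.zero_add] at h
  rw [h]

theorem pvRange'Cons (a x : Nat) : List.range' a (1 + x) = a :: List.range' (a + 1) x := by
  have e : 1 + x = x + 1 := by omega
  rw [e, List.range'_succ]

-- a filtered block of positions equals the filtered zipIdx of its data run
theorem pvZipFilter {β : Type} : ∀ (chunk : List String) (s1 s2 : Nat)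
    (cond : Nat → Bool) (g : Nat → β) (g' : Nat → β)
    (hc : ∀ t (ht : t < chunk.length), cond (s2 + t) = (chunk[t] == "1"))
    (hg : ∀ t, g' (s1 + t) = g (s2 + t)),
    ((chunk.zipIdx s1).filter (fun p => p.1 == "1")).map (fun p => g' p.2)
    = ((List.range' s2 chunk.length).filter cond).map g := by
  intro chunk
  induction chunk with
  | nil => intro s1 s2 cond g g' hc hg; simp
  | cons x t ih =>
    intro s1 s2 cond g g' hc hg
    rw [List.zipIdx_cons]
    have hr : List.range' s2 (x :: t).length = s2 :: List.range' (s2 + 1) t.length := by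
      simp [List.range'_succ]
    rw [hr, List.filter_cons, List.filter_cons]
    have hc0 : cond s2 = (x == "1") := by simpa using hc 0 (by simp)
    have ihx := ih (s1 + 1) (s2 + 1) cond g g'
      (by intro u hu
          have h := hc (u + 1) (by simpa using Nat.succ_lt_succ hu)
          rw [show s2 + 1 + u = s2 + (u + 1) from by omega]
          simpa using h)
      (by intro u
          have h := hg (u + 1)
          rw [show s1 + 1 + u = s1 + (u + 1) from by omega,
              show s2 + 1 + u = s2 + (u + 1) from by omega]
          exact h)
    by_cases hx : (x == "1") = true
    · rw [if_pos hx, if_pos (by rw [hc0]; exact hx)]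
      simp only [List.map_cons]
      rw [ihx]
      congr 1
      simpa using hg 0
    · rw [if_neg hx, if_neg (by rw [hc0]; exact hx)]
      exact ihx

-- B's kod assembly loop is a flatMap
theorem pvFoldFlat {α β : Type} (g : α → List β) : ∀ (l : List α) (acc : List β),
    l.foldl (fun a x => a ++ g x) acc = acc ++ l.flatMap g := by
  intro l
  induction l with
  | nil => intro acc; simp
  | cons x t ih =>
    intro acc
    simp only [List.foldl_cons, List.flatMap_cons, ih, List.append_assoc]

-- block-local arithmetic facts used by both main inductions
theorem pvBlockFacts (m K : Nat) (h2K : 2 ^ K < m + K + 1) :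
    pvS m K = 2 ^ K - 1 - K ∧ pvS m (K + 1) ≤ m ∧
    pvS m (K + 1) - pvS m K ≤ 2 ^ K - 1 ∧
    K + 1 + pvS m (K + 1) = (K + pvS m K) + (1 + (pvS m (K + 1) - pvS m K)) ∧
    K + pvS m K = 2 ^ K - 1 := by
  have h1 : K < 2 ^ K := Nat.lt_two_pow_self
  have h2 : 2 ^ (K + 1) = 2 * 2 ^ K := by rw [pow_succ]; ring
  unfold pvS
  omega

-- bit-lengths inside block K
theorem pvBlockBL (K t : Nat) (ht : t ≤ 2 ^ K - 1) : pvBL (2 ^ K + t) = K + 1 := by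
  have h1 : 1 ≤ 2 ^ K := Nat.one_le_two_pow
  have h2 : 2 ^ (K + 1) = 2 * 2 ^ K := by rw [pow_succ]; ring
  exact pvBL_eq_of _ _ (by omega) (by simp) (by omega)

-- positions 2^K+1+t (t < 2^K-1) are data positions, with pvCnt = pvS + t
theorem pvBlockData (m K t : Nat) (h2K : 2 ^ K < m + K + 1) (ht : t < pvS m (K + 1) - pvS m K) :
    (((2 ^ K + t + 1) &&& (2 ^ K + t) == 0) = false) ∧ pvCnt (2 ^ K + t + 1) = pvS m K + t := by
  obtain ⟨hSK, hS1, hlen, hKS, ha⟩ := pvBlockFacts m K h2K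
  have h1 : 1 ≤ 2 ^ K := Nat.one_le_two_pow
  have hbl1 : pvBL (2 ^ K + t + 1) = K + 1 := by
    have e : 2 ^ K + t + 1 = 2 ^ K + (t + 1) := by omega
    rw [e]
    exact pvBlockBL K (t + 1) (by omega)
  constructor
  · rcases Bool.eq_false_or_eq_true (((2 ^ K + t + 1) &&& (2 ^ K + t)) == 0) with h | h
    swap
    · exact h
    · exfalso
      have h3 := (pvPow2_iff (2 ^ K + t + 1) (by omega)).mp (by
        have e : 2 ^ K + t + 1 - 1 = 2 ^ K + t := by omega
        rw [e]
        exact h)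
      rw [hbl1] at h3
      simp only [Nat.add_sub_cancel] at h3
      omega
  · have e : 2 ^ K + t + 1 - 1 = 2 ^ K + t := by omega
    show (List.range' 1 (2 ^ K + t + 1 - 1)).countP pvQ = _
    rw [e, pvCountQ (2 ^ K + t), pvBlockBL K t (by omega)]
    omega

-- main induction, kod part: the blocks flatten to the canonical codeword
theorem pvMainA (veri : List String) : ∀ K, K ≤ hesaplaGo veri.length 0 →
    (List.range K).flatMap (fun (k : Nat) =>
        PySem.Int.toStr (PySem.Int.band
          (pvCheck veri (veri.length + hesaplaGo veri.length 0) >>> k) 1)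
          :: pvChunk veri.reverse veri.length k)
      = (List.range (K + pvS veri.length K)).map (fun i =>
          if ((i + 1) &&& i == 0) = true then
            PySem.Int.toStr (PySem.Int.band
              (pvCheck veri (veri.length + hesaplaGo veri.length 0) >>> (pvBL (i + 1) - 1)) 1)
          else veri.reverse.getD (pvCnt (i + 1)) "") := by
  intro K
  induction K with
  | zero => intro _; simp [pvS]
  | succ K ih =>
    intro hK1
    obtain ⟨-, -, h2⟩ := hesaplaGo_spec veri.length 0
    have h2K : 2 ^ K < veri.length + K + 1 := h2 K (by omega) (by omega)
    obtain ⟨hSK, hS1, hlen, hKS, ha⟩ := pvBlockFacts veri.length K h2K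
    have h1 : 1 ≤ 2 ^ K := Nat.one_le_two_pow
    rw [List.range_succ, List.flatMap_append, ih (by omega), hKS,
        pvRangeSplit (K + pvS veri.length K) (1 + (pvS veri.length (K + 1) - pvS veri.length K)),
        List.map_append]
    congr 1
    simp only [List.flatMap_cons, List.flatMap_nil, List.append_nil]
    rw [pvRange'Cons, List.map_cons]
    have hhead : ((K + pvS veri.length K + 1) &&& (K + pvS veri.length K) == 0) = true := by
      have e : K + pvS veri.length K + 1 = 2 ^ K := by omega
      have h3 := (pvPow2_iff (2 ^ K) (by omega)).mpr (by
        rw [pvBL_pow]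
        simp)
      rw [e]
      have e2 : 2 ^ K - 1 = K + pvS veri.length K := by omega
      rw [← e2]
      exact h3
    have hheadbl : pvBL (K + pvS veri.length K + 1) = K + 1 := by
      have e : K + pvS veri.length K + 1 = 2 ^ K := by omega
      rw [e, pvBL_pow]
    congr 1
    · rw [if_pos hhead, hheadbl]
      simp
    · apply List.ext_getElem
      · have hrevlen : veri.reverse.length = veri.length := by simp
        simp only [pvChunk, List.length_map, List.length_range', List.length_take,
          List.length_drop, hrevlen]
        omega
      · intro t h1' h2'
        have hrevlen : veri.reverse.length = veri.length := by simp
        have ht : t < pvS veri.length (K + 1) - pvS veri.length K := by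
          simp only [pvChunk, List.length_take, List.length_drop, hrevlen] at h1'
          omega
        simp only [List.getElem_map, List.getElem_range', one_mul]
        have hi : K + pvS veri.length K + 1 + t = 2 ^ K + t := by omega
        rw [hi]
        obtain ⟨hband, hcnt⟩ := pvBlockData veri.length K t h2K ht
        rw [if_neg (by rw [hband]; exact Bool.false_ne_true), hcnt]
        have hSt : pvS veri.length K + t < veri.length := by omega
        rw [List.getD_eq_getElem veri.reverse "" (by omega)]
        simp only [pvChunk]
        rw [List.getElem_take, List.getElem_drop]

-- main induction, positions part: the block position lists flatten to the canonical one
theorem pvMainB (veri : List String) : ∀ K, K ≤ hesaplaGo veri.length 0 →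
    (List.range K).flatMap (fun k => pvPosL (2 ^ k) 1 (pvChunk veri.reverse veri.length k))
      = (((List.range (K + pvS veri.length K)).filter (fun i =>
            pvQ (i + 1) && (veri.reverse.getD (pvCnt (i + 1)) "" == "1"))).map (fun i => i + 1)).map
          (fun i : Nat => (i : Int)) := by
  intro K
  induction K with
  | zero => intro _; simp [pvS]
  | succ K ih =>
    intro hK1
    obtain ⟨-, -, h2⟩ := hesaplaGo_spec veri.length 0
    have h2K : 2 ^ K < veri.length + K + 1 := h2 K (by omega) (by omega)
    obtain ⟨hSK, hS1, hlen, hKS, ha⟩ := pvBlockFacts veri.length K h2K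
    have h1 : 1 ≤ 2 ^ K := Nat.one_le_two_pow
    rw [List.range_succ, List.flatMap_append, ih (by omega), hKS,
        pvRangeSplit (K + pvS veri.length K) (1 + (pvS veri.length (K + 1) - pvS veri.length K)),
        List.filter_append, List.map_append, List.map_append]
    congr 1
    simp only [List.flatMap_cons, List.flatMap_nil, List.append_nil]
    rw [pvRange'Cons, List.filter_cons]
    have hheadq : pvQ (K + pvS veri.length K + 1) = false := by
      have e : K + pvS veri.length K + 1 = 2 ^ K := by omega
      have h3 := (pvPow2_iff (2 ^ K) (by omega)).mpr (by rw [pvBL_pow]; simp)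
      simp only [pvQ, e, bne_iff_ne, ne_eq]
      simp only [beq_iff_eq] at h3
      simp [h3]
    rw [if_neg (by rw [hheadq]; simp)]
    have hchl : (pvChunk veri.reverse veri.length K).length
        = pvS veri.length (K + 1) - pvS veri.length K := by
      have hrevlen : veri.reverse.length = veri.length := by simp
      simp only [pvChunk, List.length_take, List.length_drop, hrevlen]
      omega
    have hz := pvZipFilter (β := Int) (pvChunk veri.reverse veri.length K) 1
      (K + pvS veri.length K + 1)
      (fun i => pvQ (i + 1) && (veri.reverse.getD (pvCnt (i + 1)) "" == "1"))
      (fun i => ((i + 1 : Nat) : Int))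
      (fun j => ((2 ^ K + j : Nat) : Int))
      (by
        intro t ht
        rw [hchl] at ht
        have hi : K + pvS veri.length K + 1 + t = 2 ^ K + t := by omega
        rw [hi]
        beta_reduce
        obtain ⟨hband, hcnt⟩ := pvBlockData veri.length K t h2K ht
        have hq : pvQ (2 ^ K + t + 1) = true := by
          simp only [pvQ, Nat.add_sub_cancel, bne_iff_ne, ne_eq]
          intro hc
          rw [hc] at hband
          simp at hband
        rw [hq, hcnt, Bool.true_and]
        have hlt : t < pvS veri.length (K + 1) - pvS veri.length K := ht
        have hSt : pvS veri.length K + t < veri.length := by omega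
        rw [List.getD_eq_getElem veri.reverse "" (by simpa using hSt)]
        simp only [pvChunk]
        rw [List.getElem_take, List.getElem_drop])
      (by
        intro t
        show ((2 ^ K + (1 + t) : Nat) : Int) = (((K + pvS veri.length K + 1 + t) + 1 : Nat) : Int)
        congr 1
        omega)
    rw [hchl] at hz
    unfold pvPosL
    rw [hz, List.map_map]
    rfl

-- ===== side B: port B equals the canonical form =====
theorem pvSideB (veri : List String) : kod_olustur_alt veri = pvOut veri := by
  obtain ⟨hF1, hmin, hbn, htot⟩ := pvFacts veri.length
  simp only [kod_olustur_alt, pvOut]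
  rw [pvBlocksLoop veri.reverse veri.length (hesaplaGo veri.length 0)]
  simp only [pvFst]
  rw [pvZipIdxMap (pvChunk veri.reverse veri.length) (hesaplaGo veri.length 0)]
  rw [pvOuter (hesaplaGo veri.length 0)
      ((List.range (hesaplaGo veri.length 0)).map (fun k => (pvChunk veri.reverse veri.length k, k)))
      0 []]
  have hflat : ((List.range (hesaplaGo veri.length 0)).map
        (fun k => (pvChunk veri.reverse veri.length k, k))).flatMap
        (fun kc => pvPosL (2 ^ kc.2) 1 kc.1)
      = pvL veri (veri.length + hesaplaGo veri.length 0) := by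
    rw [List.flatMap_map]
    have hSr : pvS veri.length (hesaplaGo veri.length 0) = veri.length := by
      have h1 : hesaplaGo veri.length 0 < 2 ^ hesaplaGo veri.length 0 := Nat.lt_two_pow_self
      unfold pvS
      omega
    have h := pvMainB veri (hesaplaGo veri.length 0) le_rfl
    rw [hSr, Nat.add_comm (hesaplaGo veri.length 0) veri.length] at h
    exact h
  rw [hflat]
  have hchk : (pvL veri (veri.length + hesaplaGo veri.length 0)).foldl
      (fun c x => PySem.Int.bxor c x) 0 = pvCheck veri (veri.length + hesaplaGo veri.length 0) := rfl
  rw [hchk]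
  simp only [pvFst, pvSnd, List.nil_append]
  rw [pvFoldFlat]
  simp only [List.nil_append]
  have hkod : ((List.range (hesaplaGo veri.length 0)).map
        (fun k => (pvChunk veri.reverse veri.length k, k))).flatMap
        (fun (kc : List String × Nat) => PySem.Int.toStr (PySem.Int.band
          (pvCheck veri (veri.length + hesaplaGo veri.length 0) >>> kc.2) 1) :: kc.1)
      = pvKodF veri (veri.length + hesaplaGo veri.length 0) (hesaplaGo veri.length 0) := by
    rw [List.flatMap_map]
    have hSr : pvS veri.length (hesaplaGo veri.length 0) = veri.length := by
      have h1 : hesaplaGo veri.length 0 < 2 ^ hesaplaGo veri.length 0 := Nat.lt_two_pow_self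
      unfold pvS
      omega
    have h := pvMainA veri (hesaplaGo veri.length 0) le_rfl
    rw [hSr, Nat.add_comm (hesaplaGo veri.length 0) veri.length] at h
    exact h
  rw [hkod]

-- ===== VERDICT (by name: the statement is the Claim_ definition above) =====
theorem kod_olustur_spec : Claim_equal_kod_olustur := by
  intro veri _
  unfold Spec_kod_olustur
  rw [pvSideA veri, pvSideB veri]
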